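-- pv_equiv track=rewrite | github.com/think41/extrasuite | extrasheet/src/extrasheet/formula_compression.py | _cells_form_contiguous_range
-- ===== SOURCE A (Python) =====
-- def _cells_form_contiguous_range(
--     cells: list[tuple[int, int]],
-- ) -> tuple[int, int, int, int] | None:
--     """Check if cells form a contiguous rectangular range.
--
--     Returns (start_row, end_row, start_col, end_col) if contiguous, None otherwise.
--     """
--     if not cells:
--         return None
--
--     rows = sorted({r for r, c in cells})
--     cols = sorted({c for r, c in cells})
--
--     # Check if it's a single column or single row range
--     if len(cols) == 1 and rows == list(range(min(rows), max(rows) + 1)):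
--         # Single column - rows are contiguous
--         return (min(rows), max(rows) + 1, cols[0], cols[0] + 1)
--     elif len(rows) == 1 and cols == list(range(min(cols), max(cols) + 1)):
--         # Single row - cols are contiguous
--         return (rows[0], rows[0] + 1, min(cols), max(cols) + 1)
--
--     # Check for full rectangular range
--     expected_cells = {
--         (r, c)
--         for r in range(min(rows), max(rows) + 1)
--         for c in range(min(cols), max(cols) + 1)
--     }
--     if set(cells) == expected_cells:
--         return (min(rows), max(rows) + 1, min(cols), max(cols) + 1)
--
--     return None
-- ===== SOURCE B (Python) =====
-- def _cells_form_contiguous_range(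
--     cells: list[tuple[int, int]],
-- ) -> tuple[int, int, int, int] | None:
--     """Check if cells form a contiguous rectangular range.
--
--     Returns (start_row, end_row, start_col, end_col) if contiguous, None otherwise.
--     """
--     if not cells:
--         return None
--     distinct = set(cells)
--     min_r = min(r for r, _ in distinct)
--     max_r = max(r for r, _ in distinct)
--     min_c = min(c for _, c in distinct)
--     max_c = max(c for _, c in distinct)
--     if len(distinct) == (max_r - min_r + 1) * (max_c - min_c + 1):
--         return (min_r, max_r + 1, min_c, max_c + 1)
--     return None
-- ===== Notes on version B (the rewrite author's own statement) =====
-- stated objective: faster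
-- what changed: Instead of sorting the row/column sets, checking two special branches and materializing the full expected cell set of bounding-box size, B deduplicates the cells once and compares the distinct-cell count with the bounding-box area.
import Mathlib
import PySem

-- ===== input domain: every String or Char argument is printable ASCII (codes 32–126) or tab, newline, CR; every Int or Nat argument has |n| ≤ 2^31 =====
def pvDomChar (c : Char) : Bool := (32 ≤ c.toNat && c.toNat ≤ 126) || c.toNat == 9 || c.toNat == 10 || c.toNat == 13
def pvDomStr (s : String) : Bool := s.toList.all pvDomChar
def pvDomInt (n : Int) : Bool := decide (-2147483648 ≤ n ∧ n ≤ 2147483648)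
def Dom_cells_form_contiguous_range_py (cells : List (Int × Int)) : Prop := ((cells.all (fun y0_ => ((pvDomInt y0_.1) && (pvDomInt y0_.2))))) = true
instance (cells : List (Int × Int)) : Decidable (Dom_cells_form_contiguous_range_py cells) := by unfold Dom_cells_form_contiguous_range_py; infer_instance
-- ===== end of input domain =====

-- B replaces A's sorted-sets + expected-set materialization by a single dedup and a
-- count-vs-bounding-box-area comparison (objective: faster, asymptotic).


-- ===== PORT A =====
-- min(rows)/max(rows) etc. never raise where reached (rows/cols nonempty), so `.getD 0` is exact.
def cells_form_contiguous_range_py (cells : List (Int × Int)) : Option (Int × Int × Int × Int) :=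
  if cells = [] then
    none
  else
    let rows := PySem.List.sorted (PySem.Set.ofList (cells.map (fun rc => rc.1))) (fun x => x) false
    let cols := PySem.List.sorted (PySem.Set.ofList (cells.map (fun rc => rc.2))) (fun x => x) false
    let minR := (PySem.List.min? rows (fun x => x)).getD 0
    let maxR := (PySem.List.max? rows (fun x => x)).getD 0
    let minC := (PySem.List.min? cols (fun x => x)).getD 0
    let maxC := (PySem.List.max? cols (fun x => x)).getD 0
    if cols.length = 1 ∧ rows = PySem.List.pyRange minR (maxR + 1) 1 then
      some (minR, maxR + 1, PySem.List.pyGetD cols 0 0, PySem.List.pyGetD cols 0 0 + 1)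
    else if rows.length = 1 ∧ cols = PySem.List.pyRange minC (maxC + 1) 1 then
      some (PySem.List.pyGetD rows 0 0, PySem.List.pyGetD rows 0 0 + 1, minC, maxC + 1)
    else
      -- set comprehension over two ranges: its elements are pairwise distinct, so the list it
      -- enumerates IS already the set (PySem.Set.ofList returns it unchanged: pvExpected_ofList
      -- below); building it directly is exact and keeps the port evaluable
      let expected : PySem.Set (Int × Int) := (PySem.List.pyRange minR (maxR + 1) 1).flatMap
        (fun r => (PySem.List.pyRange minC (maxC + 1) 1).map (fun c => (r, c)))
      if PySem.Set.equal (PySem.Set.ofList cells) expected then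
        some (minR, maxR + 1, minC, maxC + 1)
      else
        none

-- ===== PORT B =====
-- min/max over the set `distinct` are order-independent, hence exact; they never raise here.
def cells_form_contiguous_range_py_alt (cells : List (Int × Int)) : Option (Int × Int × Int × Int) :=
  if cells = [] then
    none
  else
    let distinct : PySem.Set (Int × Int) := PySem.Set.ofList cells
    let minR := (PySem.List.min? (distinct.map (fun rc => rc.1)) (fun x => x)).getD 0
    let maxR := (PySem.List.max? (distinct.map (fun rc => rc.1)) (fun x => x)).getD 0
    let minC := (PySem.List.min? (distinct.map (fun rc => rc.2)) (fun x => x)).getD 0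
    let maxC := (PySem.List.max? (distinct.map (fun rc => rc.2)) (fun x => x)).getD 0
    if PySem.Set.len distinct = (maxR - minR + 1) * (maxC - minC + 1) then
      some (minR, maxR + 1, minC, maxC + 1)
    else
      none

-- ===== PRECONDITION & SPEC =====
def Spec_cells_form_contiguous_range_py (cells : List (Int × Int)) (out : Option (Int × Int × Int × Int)) : Prop := out = cells_form_contiguous_range_py_alt cells
instance (cells : List (Int × Int)) (out : Option (Int × Int × Int × Int)) : Decidable (Spec_cells_form_contiguous_range_py cells out) := by unfold Spec_cells_form_contiguous_range_py; infer_instance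

-- ===== CLAIM (what is proved, stated in full; the proofs are below) =====
def Claim_equal_cells_form_contiguous_range_py : Prop := ∀ (cells : List (Int × Int)), Dom_cells_form_contiguous_range_py cells → Spec_cells_form_contiguous_range_py cells (cells_form_contiguous_range_py cells)

-- ===== LEMMAS AND PROOFS =====

/-- `m` is the minimum value of `xs`. -/
def pvIsMin (m : Int) (xs : List Int) : Prop := m ∈ xs ∧ ∀ y ∈ xs, m ≤ y

/-- `m` is the maximum value of `xs`. -/
def pvIsMax (m : Int) (xs : List Int) : Prop := m ∈ xs ∧ ∀ y ∈ xs, y ≤ m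

theorem pvMin_getD (xs : List Int) (h : xs ≠ []) :
    pvIsMin ((PySem.List.min? xs (fun x => x)).getD 0) xs := by
  cases ho : PySem.List.min? xs (fun x => x) with
  | none => exact absurd ((PySem.List.min?_eq_none_iff xs _).mp ho) h
  | some m =>
    refine ⟨?_, ?_⟩ <;> simp only [Option.getD_some]
    · exact PySem.List.min?_mem ho
    · exact PySem.List.min?_isMin ho

theorem pvMax_getD (xs : List Int) (h : xs ≠ []) :
    pvIsMax ((PySem.List.max? xs (fun x => x)).getD 0) xs := by
  cases ho : PySem.List.max? xs (fun x => x) with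
  | none => exact absurd ((PySem.List.max?_eq_none_iff xs _).mp ho) h
  | some m =>
    refine ⟨?_, ?_⟩ <;> simp only [Option.getD_some]
    · exact PySem.List.max?_mem ho
    · exact PySem.List.max?_isMax ho

theorem pvMin_congr {m m' : Int} {xs ys : List Int} (h : pvIsMin m xs) (h' : pvIsMin m' ys)
    (hmem : ∀ y, y ∈ xs ↔ y ∈ ys) : m = m' :=
  le_antisymm (h.2 m' ((hmem m').mpr h'.1)) (h'.2 m ((hmem m).mp h.1))

theorem pvMax_congr {m m' : Int} {xs ys : List Int} (h : pvIsMax m xs) (h' : pvIsMax m' ys)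
    (hmem : ∀ y, y ∈ xs ↔ y ∈ ys) : m = m' :=
  le_antisymm (h'.2 m ((hmem m).mp h.1)) (h.2 m' ((hmem m').mpr h'.1))

theorem pvOfList_ne_nil {α : Type} [BEq α] [LawfulBEq α] {xs : List α} (h : xs ≠ []) :
    PySem.Set.ofList xs ≠ [] := by
  intro he
  rcases List.exists_mem_of_ne_nil xs h with ⟨x, hx⟩
  have hm := (PySem.Set.mem_ofList xs x).mpr hx
  rw [he] at hm
  exact absurd hm (List.not_mem_nil)

/-- The core count argument: a duplicate-free list of cells inside the bounding box
    `[a,b] × [c,d]` has exactly `(b-a+1)*(d-c+1)` elements iff it is the full box. -/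
theorem pvCount (S : List (Int × Int)) (hnd : S.Nodup) (a b c d : Int)
    (hab : a ≤ b) (hcd : c ≤ d)
    (hsub : ∀ x ∈ S, a ≤ x.1 ∧ x.1 ≤ b ∧ c ≤ x.2 ∧ x.2 ≤ d) :
    ((S.length : Int) = (b - a + 1) * (d - c + 1) ↔
      ∀ x : Int × Int, x ∈ S ↔ a ≤ x.1 ∧ x.1 ≤ b ∧ c ≤ x.2 ∧ x.2 ≤ d) := by
  classical
  have hBcard : (((Finset.Icc a b ×ˢ Finset.Icc c d).card : Int)) = (b - a + 1) * (d - c + 1) := by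
    rw [Finset.card_product, Int.card_Icc, Int.card_Icc, Nat.cast_mul,
      Int.toNat_of_nonneg (by omega), Int.toNat_of_nonneg (by omega)]
    ring
  have hsubF : S.toFinset ⊆ Finset.Icc a b ×ˢ Finset.Icc c d := by
    intro x hx
    have hb := hsub x (List.mem_toFinset.mp hx)
    simp only [Finset.mem_product, Finset.mem_Icc]
    exact ⟨⟨hb.1, hb.2.1⟩, hb.2.2.1, hb.2.2.2⟩
  have hcardS : S.toFinset.card = S.length := List.toFinset_card_of_nodup hnd
  constructor
  · intro hlen
    have hc : (Finset.Icc a b ×ˢ Finset.Icc c d).card ≤ S.toFinset.card := by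
      have h2 : ((Finset.Icc a b ×ˢ Finset.Icc c d).card : Int) = (S.toFinset.card : Int) := by
        rw [hBcard, hcardS]; exact hlen.symm
      omega
    have hEq := Finset.eq_of_subset_of_card_le hsubF hc
    intro x
    rw [← List.mem_toFinset, hEq]
    simp only [Finset.mem_product, Finset.mem_Icc]
    tauto
  · intro hmem
    have hEq : S.toFinset = Finset.Icc a b ×ˢ Finset.Icc c d := by
      ext x
      rw [List.mem_toFinset, hmem x]
      simp only [Finset.mem_product, Finset.mem_Icc]
      tauto
    have h2 : (S.length : Int) = ((Finset.Icc a b ×ˢ Finset.Icc c d).card : Int) := by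
      rw [← hcardS, hEq]
    rw [h2, hBcard]

/-- Membership in A's `expected` set of the whole bounding box. -/
theorem pvMemExpected (a b c d : Int) (x : Int × Int) :
    (x ∈ (PySem.List.pyRange a (b + 1) 1).flatMap
        (fun r => (PySem.List.pyRange c (d + 1) 1).map (fun cc => (r, cc))) ↔
      a ≤ x.1 ∧ x.1 ≤ b ∧ c ≤ x.2 ∧ x.2 ≤ d) := by
  rw [List.mem_flatMap]
  constructor
  · rintro ⟨r, hr, hx⟩
    rcases List.mem_map.mp hx with ⟨cc, hcc, rfl⟩
    rw [PySem.List.mem_pyRange_one] at hr hcc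
    exact ⟨hr.1, by omega, hcc.1, by omega⟩
  · rintro ⟨h1, h2, h3, h4⟩
    refine ⟨x.1, ?_, ?_⟩
    · rw [PySem.List.mem_pyRange_one]; omega
    · exact List.mem_map.mpr ⟨x.2, by rw [PySem.List.mem_pyRange_one]; omega, rfl⟩

/-- The two-range comprehension enumerates pairwise-distinct pairs: applying
    `PySem.Set.ofList` to it is the identity, so the list IS the comprehension's set. -/
theorem pvExpected_ofList (a b c d : Int) :
    PySem.Set.ofList ((PySem.List.pyRange a (b + 1) 1).flatMap
        (fun r => (PySem.List.pyRange c (d + 1) 1).map (fun cc => (r, cc)))) =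
      (PySem.List.pyRange a (b + 1) 1).flatMap
        (fun r => (PySem.List.pyRange c (d + 1) 1).map (fun cc => (r, cc))) := by
  apply PySem.Set.ofList_eq_self_of_nodup
  rw [List.nodup_flatMap]
  constructor
  · intro r _
    exact (PySem.List.nodup_pyRange_one c (d + 1)).map
      (fun c1 c2 h => congrArg Prod.snd h)
  · refine (PySem.List.pairwise_lt_pyRange_one a (b + 1)).imp ?_
    intro r1 r2 hlt x hx1 hx2
    rcases List.mem_map.mp hx1 with ⟨c1, _, rfl⟩
    rcases List.mem_map.mp hx2 with ⟨c2, _, hcc⟩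
    exact absurd (congrArg Prod.fst hcc) (by simp; omega)

theorem pv_main (cells : List (Int × Int)) :
    cells_form_contiguous_range_py cells = cells_form_contiguous_range_py_alt cells := by
  by_cases hnil : cells = []
  · rw [cells_form_contiguous_range_py, cells_form_contiguous_range_py_alt, if_pos hnil, if_pos hnil]
  · rw [cells_form_contiguous_range_py, cells_form_contiguous_range_py_alt, if_neg hnil, if_neg hnil]
    simp only []
    set rows := PySem.List.sorted (PySem.Set.ofList (cells.map (fun rc => rc.1))) (fun x => x) false with hrows
    set cols := PySem.List.sorted (PySem.Set.ofList (cells.map (fun rc => rc.2))) (fun x => x) false with hcols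
    have hrowsm : ∀ y, y ∈ rows ↔ y ∈ cells.map (fun rc => rc.1) := fun y => by
      rw [hrows, PySem.List.mem_sorted, PySem.Set.mem_ofList]
    have hcolsm : ∀ y, y ∈ cols ↔ y ∈ cells.map (fun rc => rc.2) := fun y => by
      rw [hcols, PySem.List.mem_sorted, PySem.Set.mem_ofList]
    have hrowsne : rows ≠ [] := by
      rw [hrows, Ne, PySem.List.sorted_eq_nil_iff]
      exact pvOfList_ne_nil (by simpa using hnil)
    have hcolsne : cols ≠ [] := by
      rw [hcols, Ne, PySem.List.sorted_eq_nil_iff]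
      exact pvOfList_ne_nil (by simpa using hnil)
    set a := (PySem.List.min? rows (fun x => x)).getD 0 with ha
    set b := (PySem.List.max? rows (fun x => x)).getD 0 with hb
    set c := (PySem.List.min? cols (fun x => x)).getD 0 with hc
    set d := (PySem.List.max? cols (fun x => x)).getD 0 with hd
    have haS : pvIsMin a (cells.map (fun rc => rc.1)) := by
      have := pvMin_getD rows hrowsne
      exact ⟨(hrowsm a).mp this.1, fun y hy => this.2 y ((hrowsm y).mpr hy)⟩
    have hbS : pvIsMax b (cells.map (fun rc => rc.1)) := by
      have := pvMax_getD rows hrowsne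
      exact ⟨(hrowsm b).mp this.1, fun y hy => this.2 y ((hrowsm y).mpr hy)⟩
    have hcS : pvIsMin c (cells.map (fun rc => rc.2)) := by
      have := pvMin_getD cols hcolsne
      exact ⟨(hcolsm c).mp this.1, fun y hy => this.2 y ((hcolsm y).mpr hy)⟩
    have hdS : pvIsMax d (cells.map (fun rc => rc.2)) := by
      have := pvMax_getD cols hcolsne
      exact ⟨(hcolsm d).mp this.1, fun y hy => this.2 y ((hcolsm y).mpr hy)⟩
    -- B's extrema over the deduplicated cells coincide with A's
    have hsetm1 : ∀ y, y ∈ (PySem.Set.ofList cells).map (fun rc : Int × Int => rc.1) ↔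
        y ∈ cells.map (fun rc : Int × Int => rc.1) := fun y => by
      simp only [List.mem_map, PySem.Set.mem_ofList]
    have hsetm2 : ∀ y, y ∈ (PySem.Set.ofList cells).map (fun rc : Int × Int => rc.2) ↔
        y ∈ cells.map (fun rc : Int × Int => rc.2) := fun y => by
      simp only [List.mem_map, PySem.Set.mem_ofList]
    have hNe1 : (PySem.Set.ofList cells).map (fun rc : Int × Int => rc.1) ≠ [] := by
      simpa using pvOfList_ne_nil hnil
    have hNe2 : (PySem.Set.ofList cells).map (fun rc : Int × Int => rc.2) ≠ [] := by
      simpa using pvOfList_ne_nil hnil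
    rw [show (PySem.List.min? ((PySem.Set.ofList cells).map (fun rc => rc.1)) (fun x => x)).getD 0 = a from
        pvMin_congr (pvMin_getD _ hNe1) haS hsetm1,
      show (PySem.List.max? ((PySem.Set.ofList cells).map (fun rc => rc.1)) (fun x => x)).getD 0 = b from
        pvMax_congr (pvMax_getD _ hNe1) hbS hsetm1,
      show (PySem.List.min? ((PySem.Set.ofList cells).map (fun rc => rc.2)) (fun x => x)).getD 0 = c from
        pvMin_congr (pvMin_getD _ hNe2) hcS hsetm2,
      show (PySem.List.max? ((PySem.Set.ofList cells).map (fun rc => rc.2)) (fun x => x)).getD 0 = d from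
        pvMax_congr (pvMax_getD _ hNe2) hdS hsetm2]
    -- the counting equivalence
    have hbounds : ∀ x ∈ cells, a ≤ x.1 ∧ x.1 ≤ b ∧ c ≤ x.2 ∧ x.2 ≤ d := by
      intro x hx
      exact ⟨haS.2 _ (List.mem_map_of_mem hx), hbS.2 _ (List.mem_map_of_mem hx),
        hcS.2 _ (List.mem_map_of_mem hx), hdS.2 _ (List.mem_map_of_mem hx)⟩
    have hK : (PySem.Set.len (PySem.Set.ofList cells) = (b - a + 1) * (d - c + 1)) ↔
        ∀ x : Int × Int, x ∈ cells ↔ a ≤ x.1 ∧ x.1 ≤ b ∧ c ≤ x.2 ∧ x.2 ≤ d := by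
      have hS := pvCount (PySem.Set.ofList cells) (PySem.Set.nodup_ofList cells) a b c d
        (haS.2 _ hbS.1) (hcS.2 _ hdS.1)
        (fun x hx => hbounds x ((PySem.Set.mem_ofList cells x).mp hx))
      rw [show PySem.Set.len (PySem.Set.ofList cells) =
        ((PySem.Set.ofList cells).length : Int) from rfl]
      rw [hS]
      constructor
      · intro h x; rw [← PySem.Set.mem_ofList cells x]; exact h x
      · intro h x; rw [PySem.Set.mem_ofList cells x]; exact h x
    by_cases h1 : cols.length = 1 ∧ rows = PySem.List.pyRange a (b + 1) 1
    · rw [if_pos h1]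
      obtain ⟨hlen1, hrange⟩ := h1
      obtain ⟨e, he⟩ := List.length_eq_one_iff.mp hlen1
      have hcolse : ∀ y, y ∈ cells.map (fun rc : Int × Int => rc.2) → y = e := by
        intro y hy
        have := (hcolsm y).mpr hy
        rw [he] at this
        exact List.mem_singleton.mp this
      have hce : c = e := hcolse c hcS.1
      have hde : d = e := hcolse d hdS.1
      have hfull : ∀ x : Int × Int, x ∈ cells ↔ a ≤ x.1 ∧ x.1 ≤ b ∧ c ≤ x.2 ∧ x.2 ≤ d := by
        intro x
        refine ⟨hbounds x, ?_⟩
        rintro ⟨hx1, hx2, hx3, hx4⟩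
        have hr : x.1 ∈ rows := by
          rw [hrange, PySem.List.mem_pyRange_one]; exact ⟨hx1, by omega⟩
        obtain ⟨p, hp, hpe⟩ := List.mem_map.mp ((hrowsm x.1).mp hr)
        have hp2 : p.2 = e := hcolse p.2 (List.mem_map_of_mem hp)
        have hpx : p = x := Prod.ext hpe (by omega)
        rwa [hpx] at hp
      rw [if_pos (hK.mpr hfull)]
      have hget : PySem.List.pyGetD cols 0 0 = e := by
        rw [he]; exact PySem.List.pyGetD_zero_cons e [] 0
      rw [hget, hce, hde]
    · rw [if_neg h1]
      by_cases h2 : rows.length = 1 ∧ cols = PySem.List.pyRange c (d + 1) 1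
      · rw [if_pos h2]
        obtain ⟨hlen1, hrange⟩ := h2
        obtain ⟨e, he⟩ := List.length_eq_one_iff.mp hlen1
        have hrowse : ∀ y, y ∈ cells.map (fun rc : Int × Int => rc.1) → y = e := by
          intro y hy
          have := (hrowsm y).mpr hy
          rw [he] at this
          exact List.mem_singleton.mp this
        have hae : a = e := hrowse a haS.1
        have hbe : b = e := hrowse b hbS.1
        have hfull : ∀ x : Int × Int, x ∈ cells ↔ a ≤ x.1 ∧ x.1 ≤ b ∧ c ≤ x.2 ∧ x.2 ≤ d := by
          intro x
          refine ⟨hbounds x, ?_⟩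
          rintro ⟨hx1, hx2, hx3, hx4⟩
          have hr : x.2 ∈ cols := by
            rw [hrange, PySem.List.mem_pyRange_one]; exact ⟨hx3, by omega⟩
          obtain ⟨p, hp, hpe⟩ := List.mem_map.mp ((hcolsm x.2).mp hr)
          have hp1 : p.1 = e := hrowse p.1 (List.mem_map_of_mem hp)
          have hpx : p = x := Prod.ext (by omega) hpe
          rwa [hpx] at hp
        rw [if_pos (hK.mpr hfull)]
        have hget : PySem.List.pyGetD rows 0 0 = e := by
          rw [he]; exact PySem.List.pyGetD_zero_cons e [] 0
        rw [hget, hae, hbe]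
      · rw [if_neg h2]
        have hEq : (PySem.Set.equal (PySem.Set.ofList cells)
            ((PySem.List.pyRange a (b + 1) 1).flatMap
              (fun r => (PySem.List.pyRange c (d + 1) 1).map (fun cc => (r, cc)))) = true) ↔
            (PySem.Set.len (PySem.Set.ofList cells) = (b - a + 1) * (d - c + 1)) := by
          rw [← pvExpected_ofList a b c d, PySem.Set.equal_iff, hK]
          constructor
          · intro h x
            rw [← PySem.Set.mem_ofList cells x, h x, pvExpected_ofList, pvMemExpected]
          · intro h x
            rw [PySem.Set.mem_ofList, h x, pvExpected_ofList, pvMemExpected]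
        by_cases h3 : PySem.Set.len (PySem.Set.ofList cells) = (b - a + 1) * (d - c + 1)
        · rw [if_pos (hEq.mpr h3), if_pos h3]
        · rw [if_neg (fun hh => h3 (hEq.mp hh)), if_neg h3]

-- ===== VERDICT (by name: the statement is the Claim_ definition above) =====
theorem cells_form_contiguous_range_py_spec : Claim_equal_cells_form_contiguous_range_py := by
  intro cells _
  exact pv_main cells
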